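-- pv_equiv track=rewrite | github.com/yaoyhu/anki_packager | anki_packager/packager/deck.py | format_pos
-- ===== SOURCE A (Python) =====
-- def format_pos(text: str) -> str:
--     """Format definition with line breaks between parts of speech"""
--     if not text:
--         return ""
--
--     parts = []
--     current = []
--
--     for word in text.split():
--         # Check for part of speech markers
--         if any(
--             word.startswith(pos + ".")
--             for pos in ["n", "v", "vt", "vi", "adj", "adv"]
--         ):
--             if current:
--                 parts.append(" ".join(current))
--             current = [word]
--         else:
--             current.append(word)
--
--     if current:
--         parts.append(" ".join(current))
--
--     return "<br>".join(parts)
-- ===== SOURCE B (Python) =====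
-- def format_pos(text: str) -> str:
--     """Format definition with line breaks between parts of speech."""
--     normalized = " ".join(text.split())
--     markers = ("n.", "v.", "vt.", "vi.", "adj.", "adv.")
--     chars = []
--     for i, ch in enumerate(normalized):
--         if ch == " " and normalized.startswith(markers, i + 1):
--             chars.append("<br>")
--         else:
--             chars.append(ch)
--     return "".join(chars)
-- ===== Notes on version B (the rewrite author's own statement) =====
-- stated objective: alternative
-- what changed: A groups the split words into segments with a two-level accumulator and joins twice; B first normalizes whitespace by rejoining the split words with single spaces, then does a character-level rewrite of that normalized string, replacing each space immediately followed by a part-of-speech marker with the line-break tag.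
import Mathlib
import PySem

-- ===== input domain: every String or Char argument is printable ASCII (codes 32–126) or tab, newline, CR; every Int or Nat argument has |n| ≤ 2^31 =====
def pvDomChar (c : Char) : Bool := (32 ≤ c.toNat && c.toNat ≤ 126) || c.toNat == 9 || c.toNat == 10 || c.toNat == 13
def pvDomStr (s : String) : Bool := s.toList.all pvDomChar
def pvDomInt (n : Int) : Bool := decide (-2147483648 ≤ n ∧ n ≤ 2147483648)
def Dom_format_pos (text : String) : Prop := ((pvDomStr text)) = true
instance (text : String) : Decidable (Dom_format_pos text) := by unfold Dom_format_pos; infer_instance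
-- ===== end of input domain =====

-- B normalizes whitespace first (" ".join(text.split())) and then rewrites the normalized
-- string character by character, turning each space followed by a marker into "<br>";
-- A instead groups the words into segments with a two-level accumulator and joins twice.

-- ===== PORT A =====
-- the loop body: for word in text.split(): if any(word.startswith(pos + ".") ...): ... else: ...
def fpStepA (st : List String × List String) (word : String) : List String × List String :=
  if (["n", "v", "vt", "vi", "adj", "adv"]).any
      (fun pos => PySem.Str.startswith word (pos ++ ".")) then
    (if st.2 ≠ [] then st.1 ++ [PySem.Str.join " " st.2] else st.1, [word])
  else
    (st.1, st.2 ++ [word])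

def format_pos (text : String) : String :=
  if text = "" then ""
  else
    let r := (PySem.Str.split₀ text).foldl fpStepA ([], [])
    let parts := if r.2 ≠ [] then r.1 ++ [PySem.Str.join " " r.2] else r.1
    PySem.Str.join "<br>" parts

-- ===== PORT B =====
-- markers = ("n.", "v.", "vt.", "vi.", "adj.", "adv.") as code-point lists
def fpMarkers : List (List Char) :=
  [['n','.'], ['v','.'], ['v','t','.'], ['v','i','.'], ['a','d','j','.'], ['a','d','v','.']]

-- the character loop: for i, ch in enumerate(normalized): if ch == " " and
-- normalized.startswith(markers, i+1): append "<br>" else append ch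
-- (normalized.startswith(markers, i+1) = some marker is a prefix of the rest of the string)
def fpScan : List Char → List Char
  | [] => []
  | c :: rest =>
    if c = ' ' ∧ fpMarkers.any (fun m => m.isPrefixOf rest) then
      '<' :: 'b' :: 'r' :: '>' :: fpScan rest
    else c :: fpScan rest

def format_pos_alt (text : String) : String :=
  String.ofList (fpScan (PySem.Str.join " " (PySem.Str.split₀ text)).toList)

-- ===== PRECONDITION & SPEC =====
def Spec_format_pos (text : String) (out : String) : Prop := out = format_pos_alt text
instance (text : String) (out : String) : Decidable (Spec_format_pos text out) := by unfold Spec_format_pos; infer_instance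

-- ===== CLAIM (what is proved, stated in full; the proofs are below) =====
def Claim_equal_format_pos : Prop := ∀ (text : String), Dom_format_pos text → Spec_format_pos text (format_pos text)

-- ===== LEMMAS AND PROOFS =====

-- ---- proof-side helpers ----
-- A's marker test, string level
def isMarker (word : String) : Bool :=
  ["n.", "v.", "vt.", "vi.", "adj.", "adv."].any (fun m => PySem.Str.startswith word m)

-- word-level rendering of A's result as one flat token list
def renderStep (out : List String) (word : String) : List String :=
  if out = [] then out ++ [word]
  else if isMarker word then out ++ ["<br>" ++ word]
  else out ++ [" " ++ word]

def tokS (w : String) : String := (if isMarker w then "<br>" else " ") ++ w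

def tokC (w : List Char) : List Char :=
  (if fpMarkers.any (fun m => m.isPrefixOf w) then ['<','b','r','>'] else [' ']) ++ w

-- the separators-and-words tail of " ".join
def glue (t : List (List Char)) : List Char := t.flatMap (fun w => ' ' :: w)

-- ---- A = flat word-token pass ----
lemma charsJoin_cons (sep : List Char) (a : List Char) (l : List (List Char)) (h : l ≠ []) :
    PySem.Chars.join sep (a :: l) = a ++ sep ++ PySem.Chars.join sep l := by
  cases l with
  | nil => exact absurd rfl h
  | cons b t => exact PySem.Chars.join_cons_cons sep a b t

lemma charsJoin_append_singleton (sep : List Char) (xs : List (List Char)) (y : List Char)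
    (h : xs ≠ []) :
    PySem.Chars.join sep (xs ++ [y]) = PySem.Chars.join sep xs ++ sep ++ y := by
  induction xs with
  | nil => exact absurd rfl h
  | cons a t ih =>
    cases t with
    | nil => simp [PySem.Chars.join_cons_cons, PySem.Chars.join_singleton]
    | cons b r =>
      rw [List.cons_append, charsJoin_cons sep a ((b :: r) ++ [y]) (by simp),
          ih (by simp), charsJoin_cons sep a (b :: r) (by simp)]
      simp [List.append_assoc]

lemma strJoin_singleton (sep : String) (w : String) : PySem.Str.join sep [w] = w := by
  apply String.toList_inj.mp
  simp [PySem.Str.toList_join, PySem.Chars.join_singleton]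

lemma strJoin_br_append (xs : List String) (y : String) (h : xs ≠ []) :
    PySem.Str.join "<br>" (xs ++ [y]) = PySem.Str.join "<br>" xs ++ "<br>" ++ y := by
  apply String.toList_inj.mp
  simp only [PySem.Str.toList_join, String.toList_append, List.map_append, List.map_singleton]
  rw [charsJoin_append_singleton _ _ _ (by simpa using h)]

lemma strJoin_append_sep (xs : List String) (y : String) (h : xs ≠ []) :
    PySem.Str.join " " (xs ++ [y]) = PySem.Str.join " " xs ++ (" " ++ y) := by
  apply String.toList_inj.mp
  simp only [PySem.Str.toList_join, String.toList_append, List.map_append, List.map_singleton]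
  rw [charsJoin_append_singleton _ _ _ (by simpa using h)]
  simp [List.append_assoc]

-- A's marker test is isMarker (the literal appends "n" ++ "." etc. reduce)
lemma test_eq (w : String) :
    (["n", "v", "vt", "vi", "adj", "adv"]).any
      (fun pos => PySem.Str.startswith w (pos ++ ".")) = isMarker w := rfl

-- coupled loop invariant: the flat token list joined by "" renders what A's (parts, current) renders
lemma loop_eq (ws : List String) : ∀ (parts cur out : List String), cur ≠ [] → out ≠ [] →
    PySem.Str.join "" out = PySem.Str.join "<br>" (parts ++ [PySem.Str.join " " cur]) →
    (ws.foldl fpStepA (parts, cur)).2 ≠ [] ∧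
    PySem.Str.join "" (ws.foldl renderStep out) =
      PySem.Str.join "<br>" ((ws.foldl fpStepA (parts, cur)).1 ++
        [PySem.Str.join " " (ws.foldl fpStepA (parts, cur)).2]) := by
  induction ws with
  | nil => intro parts cur out hc ho hinv; exact ⟨hc, hinv⟩
  | cons w t ih =>
    intro parts cur out hc ho hinv
    simp only [List.foldl_cons]
    by_cases hm : isMarker w = true
    · have hA : fpStepA (parts, cur) w = (parts ++ [PySem.Str.join " " cur], [w]) := by
        unfold fpStepA; rw [test_eq, hm]; simp [hc]
      have hB : renderStep out w = out ++ ["<br>" ++ w] := by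
        simp [renderStep, ho, hm]
      rw [hA, hB]
      refine ih _ _ _ (by simp) (by simp) ?_
      have h1 : PySem.Str.join "" (out ++ ["<br>" ++ w]) = PySem.Str.join "" out ++ ("<br>" ++ w) := by
        apply String.toList_inj.mp
        simp only [PySem.Str.toList_join, String.toList_append, List.map_append, List.map_singleton]
        rw [charsJoin_append_singleton _ _ _ (by simpa using ho)]
        simp
      rw [h1, hinv, strJoin_singleton " ",
          strJoin_br_append _ w (by simp)]
      simp [String.append_assoc]
    · have hA : fpStepA (parts, cur) w = (parts, cur ++ [w]) := by
        unfold fpStepA; rw [test_eq]; simp [hm]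
      have hB : renderStep out w = out ++ [" " ++ w] := by
        simp [renderStep, ho, hm]
      rw [hA, hB]
      refine ih _ _ _ (by simp) (by simp) ?_
      have h1 : PySem.Str.join "" (out ++ [" " ++ w]) = PySem.Str.join "" out ++ (" " ++ w) := by
        apply String.toList_inj.mp
        simp only [PySem.Str.toList_join, String.toList_append, List.map_append, List.map_singleton]
        rw [charsJoin_append_singleton _ _ _ (by simpa using ho)]
        simp
      rw [h1, hinv, strJoin_append_sep cur w hc]
      have h2 : PySem.Str.join "<br>" (parts ++ [PySem.Str.join " " cur]) ++ (" " ++ w) =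
          PySem.Str.join "<br>" (parts ++ [PySem.Str.join " " cur ++ (" " ++ w)]) := by
        apply String.toList_inj.mp
        simp only [PySem.Str.toList_join, String.toList_append, List.map_append, List.map_singleton]
        cases parts with
        | nil => simp [PySem.Chars.join_singleton]
        | cons p ps =>
          rw [charsJoin_append_singleton _ _ _ (by simp), charsJoin_append_singleton _ _ _ (by simp)]
          simp [List.append_assoc]
      rw [h2]

lemma A_eq_flat (text : String) (ht : text ≠ "") :
    format_pos text = PySem.Str.join "" ((PySem.Str.split₀ text).foldl renderStep []) := by
  unfold format_pos
  simp only [ht, ite_false]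
  cases hs : PySem.Str.split₀ text with
  | nil => rfl
  | cons w ws =>
    have h1 : fpStepA ([], []) w = ([], [w]) := by
      unfold fpStepA; rw [test_eq]
      by_cases hm : isMarker w = true <;> simp [hm]
    have h2 : renderStep [] w = [w] := by simp [renderStep]
    simp only [List.foldl_cons, h1, h2]
    have := loop_eq ws [] [w] [w] (by simp) (by simp)
      (by rw [strJoin_singleton "", List.nil_append, strJoin_singleton " " w,
              strJoin_singleton "<br>"])
    rcases this with ⟨hne, heq⟩
    rw [if_pos hne]
    exact heq.symm

-- ---- flat word pass = token map ----
lemma foldl_render (t : List String) : ∀ (out : List String), out ≠ [] →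
    t.foldl renderStep out = out ++ t.map tokS := by
  induction t with
  | nil => intro out _; simp
  | cons w t ih =>
    intro out ho
    have h : renderStep out w = out ++ [tokS w] := by
      by_cases hm : isMarker w = true <;> simp [renderStep, ho, hm, tokS]
    simp only [List.foldl_cons, h, List.map_cons]
    rw [ih (out ++ [tokS w]) (by simp)]
    simp

lemma charsJoin_empty (l : List (List Char)) : PySem.Chars.join [] l = l.flatten := by
  induction l with
  | nil => simp [PySem.Chars.join_nil]
  | cons a t ih =>
    cases t with
    | nil => simp [PySem.Chars.join_singleton]
    | cons b r => rw [PySem.Chars.join_cons_cons, ih]; simp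

-- isMarker at the character level
lemma isMarker_eq (w : String) :
    isMarker w = fpMarkers.any (fun m => m.isPrefixOf w.toList) := by
  simp only [isMarker, fpMarkers, List.any_cons, List.any_nil,
    PySem.Str.startswith_eq, PySem.Chars.startswith]
  rfl

lemma toList_tokS (w : String) : (tokS w).toList = tokC w.toList := by
  unfold tokS tokC
  rw [isMarker_eq]
  by_cases h : fpMarkers.any (fun m => m.isPrefixOf w.toList) = true <;> simp [h]

-- ---- split() words are nonempty and whitespace-free ----
lemma split₀_go_good (s : List Char) : ∀ (cur : List Char) (acc : List (List Char))
    (_ : ∀ c ∈ cur, PySem.Chars.isspace c = false)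
    (_ : ∀ w ∈ acc, w ≠ [] ∧ ∀ c ∈ w, PySem.Chars.isspace c = false),
    ∀ w ∈ PySem.Chars.split₀.go s cur acc, w ≠ [] ∧ ∀ c ∈ w, PySem.Chars.isspace c = false := by
  induction s with
  | nil =>
    intro cur acc hcur hacc w hw
    by_cases hc : cur.isEmpty = true
    · rw [PySem.Chars.split₀.go.eq_1, if_pos hc, List.mem_reverse] at hw
      exact hacc w hw
    · rw [PySem.Chars.split₀.go.eq_1, if_neg hc, List.mem_reverse, List.mem_cons] at hw
      rcases hw with h | h
      · subst h
        refine ⟨?_, fun c hc' => hcur c (List.mem_reverse.mp hc')⟩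
        intro hnil
        exact hc (by simpa [List.isEmpty_iff] using (List.reverse_eq_nil_iff.mp hnil))
      · exact hacc w h
  | cons c rest ih =>
    intro cur acc hcur hacc w hw
    by_cases hsp : PySem.Chars.isspace c = true
    · by_cases hc : cur.isEmpty = true
      · rw [PySem.Chars.split₀.go.eq_2, if_pos hsp, if_pos hc] at hw
        exact ih [] acc (by simp) hacc w hw
      · rw [PySem.Chars.split₀.go.eq_2, if_pos hsp, if_neg hc] at hw
        refine ih [] (cur.reverse :: acc) (by simp) ?_ w hw
        intro w' hw'
        rcases List.mem_cons.mp hw' with h | h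
        · subst h
          refine ⟨?_, fun c' hc' => hcur c' (List.mem_reverse.mp hc')⟩
          intro hnil
          exact hc (by simpa [List.isEmpty_iff] using (List.reverse_eq_nil_iff.mp hnil))
        · exact hacc w' h
    · rw [PySem.Chars.split₀.go.eq_2, if_neg hsp] at hw
      refine ih (c :: cur) acc ?_ hacc w hw
      intro c' hc'
      rcases List.mem_cons.mp hc' with h | h
      · subst h; simpa using hsp
      · exact hcur c' h

lemma split₀_good (s : List Char) :
    ∀ w ∈ PySem.Chars.split₀ s, w ≠ [] ∧ ∀ c ∈ w, PySem.Chars.isspace c = false :=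
  split₀_go_good s [] [] (by simp) (by simp)

-- ---- the character scan over the normalized string ----
-- a space-free marker is a prefix of w ++ s (s empty or starting with ' ') iff it is a prefix of w
lemma prefix_stops (m : List Char) (hm : ' ' ∉ m) :
    ∀ (w s : List Char), (s = [] ∨ ∃ s', s = ' ' :: s') →
    m.isPrefixOf (w ++ s) = m.isPrefixOf w := by
  induction m with
  | nil => intro w s _; simp
  | cons c m ih =>
    intro w s hs
    cases w with
    | nil =>
      rcases hs with h | ⟨s', h⟩ <;> subst h
      · simp
      · simp only [List.nil_append, List.isPrefixOf]
        have : c ≠ ' ' := fun h => hm (h ▸ List.mem_cons_self ..)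
        simp [beq_eq_false_iff_ne.mpr this]
    | cons a w =>
      simp only [List.cons_append, List.isPrefixOf]
      rw [ih (fun h => hm (List.mem_cons_of_mem _ h)) w s hs]

lemma markers_stop (w s : List Char) (hs : s = [] ∨ ∃ s', s = ' ' :: s') :
    fpMarkers.any (fun m => m.isPrefixOf (w ++ s)) = fpMarkers.any (fun m => m.isPrefixOf w) := by
  simp only [fpMarkers, List.any_cons, List.any_nil]
  rw [prefix_stops _ (by decide) w s hs, prefix_stops _ (by decide) w s hs,
      prefix_stops _ (by decide) w s hs, prefix_stops _ (by decide) w s hs,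
      prefix_stops _ (by decide) w s hs, prefix_stops _ (by decide) w s hs]

lemma scan_copy (w : List Char) (hw : ∀ c ∈ w, c ≠ ' ') :
    ∀ s, fpScan (w ++ s) = w ++ fpScan s := by
  induction w with
  | nil => intro s; simp
  | cons c w ih =>
    intro s
    have hc : c ≠ ' ' := hw c (List.mem_cons_self ..)
    simp only [List.cons_append, fpScan, hc, false_and, if_false]
    rw [ih (fun c' h => hw c' (List.mem_cons_of_mem _ h)) s]

lemma glue_shape (t : List (List Char)) : glue t = [] ∨ ∃ s', glue t = ' ' :: s' := by
  cases t with
  | nil => left; rfl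
  | cons w t => right; exact ⟨w ++ glue t, rfl⟩

lemma scan_glue (t : List (List Char))
    (ht : ∀ w ∈ t, w ≠ [] ∧ ∀ c ∈ w, PySem.Chars.isspace c = false) :
    fpScan (glue t) = t.flatMap tokC := by
  induction t with
  | nil => rfl
  | cons w t ih =>
    have hw : ∀ c ∈ w, c ≠ ' ' := by
      intro c hc h
      have := (ht w (List.mem_cons_self ..)).2 c hc
      rw [h] at this
      exact absurd this (by decide)
    have hglue : glue (w :: t) = ' ' :: (w ++ glue t) := rfl
    rw [hglue]
    simp only [fpScan, true_and]
    rw [markers_stop w (glue t) (glue_shape t)]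
    have hrest : fpScan (w ++ glue t) = w ++ t.flatMap tokC := by
      rw [scan_copy w hw, ih (fun w' h => ht w' (List.mem_cons_of_mem _ h))]
    by_cases hm : fpMarkers.any (fun m => m.isPrefixOf w) = true <;>
      simp [hm, hrest, tokC, List.flatMap_cons]

lemma join_space (t : List (List Char)) : ∀ (w : List Char),
    PySem.Chars.join [' '] (w :: t) = w ++ glue t := by
  induction t with
  | nil => intro w; simp [PySem.Chars.join_singleton, glue]
  | cons b t ih =>
    intro w
    rw [PySem.Chars.join_cons_cons, ih b]
    simp [glue, List.flatMap_cons]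

-- ===== VERDICT (by name: the statement is the Claim_ definition above) =====
theorem format_pos_spec : Claim_equal_format_pos := by
  intro text _
  unfold Spec_format_pos
  by_cases ht : text = ""
  · subst ht; decide
  · rw [A_eq_flat text ht]
    apply String.toList_inj.mp
    unfold format_pos_alt
    cases hs : PySem.Str.split₀ text with
    | nil =>
      simp only [List.foldl_nil]
      have hj : PySem.Str.join " " ([] : List String) = "" := by
        apply String.toList_inj.mp
        simp [PySem.Str.toList_join, PySem.Chars.join_nil]
      rw [hj]
      have h0 : fpScan ("" : String).toList = [] := rfl
      rw [String.toList_ofList, h0]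
      simp [PySem.Str.toList_join, PySem.Chars.join_nil]
    | cons w ws =>
      have hgood : ∀ v ∈ PySem.Chars.split₀ text.toList,
          v ≠ [] ∧ ∀ c ∈ v, PySem.Chars.isspace c = false := split₀_good text.toList
      have hmap : List.map String.toList (w :: ws) = PySem.Chars.split₀ text.toList := by
        rw [← hs, PySem.Str.split₀_map_toList]
      have hwgood : w.toList ≠ [] ∧ ∀ c ∈ w.toList, PySem.Chars.isspace c = false := by
        apply hgood; rw [← hmap]; simp
      have hwsgood : ∀ v ∈ List.map String.toList ws,
          v ≠ [] ∧ ∀ c ∈ v, PySem.Chars.isspace c = false := by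
        intro v hv; apply hgood; rw [← hmap]; simp [hv]
      have hwsp : ∀ c ∈ w.toList, c ≠ ' ' := by
        intro c hc h
        have := hwgood.2 c hc
        rw [h] at this
        exact absurd this (by decide)
      -- left side: flat token pass
      have h1 : renderStep [] w = [w] := by simp [renderStep]
      have hleft : (PySem.Str.join "" ((w :: ws).foldl renderStep [])).toList =
          w.toList ++ (List.map String.toList ws).flatMap tokC := by
        simp only [List.foldl_cons, h1]
        rw [foldl_render ws [w] (by simp)]
        rw [PySem.Str.toList_join]
        have : ("" : String).toList = [] := rfl
        rw [this, charsJoin_empty]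
        simp only [List.singleton_append, List.map_cons, List.flatten_cons, List.map_map]
        congr 1
        rw [List.flatMap_def, List.map_map]
        simp only [Function.comp_def]
        congr 1
        exact List.map_congr_left (fun a _ => toList_tokS a)
      -- right side: normalized scan
      have hright : (String.ofList (fpScan (PySem.Str.join " " (w :: ws)).toList)).toList =
          w.toList ++ (List.map String.toList ws).flatMap tokC := by
        rw [String.toList_ofList, PySem.Str.toList_join]
        have hsep : (" " : String).toList = [' '] := rfl
        rw [hsep, List.map_cons, join_space (List.map String.toList ws) w.toList,
            scan_copy w.toList hwsp, scan_glue _ hwsgood]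
      rw [hleft, hright]
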